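-- pv_equiv track=rewrite | github.com/bischofmedia/RTC_CheckinBot | admin_ui.py | _filter_drivers
-- ===== SOURCE A (Python) =====
-- def _filter_drivers(mode: str, drivers: list[dict], status_map: dict) -> list[dict]:
--     """Gibt nur Fahrer zurück, auf die die Aktion sinnvoll anwendbar ist."""
--     def ok(d):
--         st = status_map.get(d["psn"], {})
--         if mode == "anmelden":   return not st.get("registered")
--         if mode == "abmelden":   return     st.get("registered")
--         if mode == "abo_an":     return not st.get("abo") and not st.get("locked")
--         if mode == "abo_aus":    return     st.get("abo")
--         if mode == "sperren":    return not st.get("locked")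
--         if mode == "entsperren": return     st.get("locked")
--         return True
--     return [d for d in drivers if ok(d)]
-- ===== SOURCE B (Python) =====
-- def _filter_drivers(mode: str, drivers: list[dict], status_map: dict) -> list[dict]:
--     """Gibt nur Fahrer zurück, auf die die Aktion sinnvoll anwendbar ist."""
--     # Staged approach: pick the status flag the mode cares about, precompute the
--     # set(s) of flagged psns from status_map in a separate pass, then filter the
--     # drivers by set membership.
--     flag = {"anmelden": "registered", "abmelden": "registered",
--             "abo_an": "abo", "abo_aus": "abo",
--             "sperren": "locked", "entsperren": "locked"}.get(mode)
--     if flag is None: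
--         return list(drivers)
--     flagged = {psn for psn, st in status_map.items() if st.get(flag)}
--     if mode == "abo_an":
--         locked = {psn for psn, st in status_map.items() if st.get("locked")}
--         return [d for d in drivers if d["psn"] not in flagged and d["psn"] not in locked]
--     if mode in ("abmelden", "abo_aus", "entsperren"):
--         return [d for d in drivers if d["psn"] in flagged]
--     return [d for d in drivers if d["psn"] not in flagged]
-- ===== Notes on version B (the rewrite author's own statement) =====
-- stated objective: alternative
-- what changed: Instead of running the mode if-chain per driver, B first maps the mode to the single status flag it inspects, precomputes the set of flagged psns in a separate pass over status_map, and then filters drivers by set membership (unknown modes return a copy of drivers without touching them).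
import Mathlib
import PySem

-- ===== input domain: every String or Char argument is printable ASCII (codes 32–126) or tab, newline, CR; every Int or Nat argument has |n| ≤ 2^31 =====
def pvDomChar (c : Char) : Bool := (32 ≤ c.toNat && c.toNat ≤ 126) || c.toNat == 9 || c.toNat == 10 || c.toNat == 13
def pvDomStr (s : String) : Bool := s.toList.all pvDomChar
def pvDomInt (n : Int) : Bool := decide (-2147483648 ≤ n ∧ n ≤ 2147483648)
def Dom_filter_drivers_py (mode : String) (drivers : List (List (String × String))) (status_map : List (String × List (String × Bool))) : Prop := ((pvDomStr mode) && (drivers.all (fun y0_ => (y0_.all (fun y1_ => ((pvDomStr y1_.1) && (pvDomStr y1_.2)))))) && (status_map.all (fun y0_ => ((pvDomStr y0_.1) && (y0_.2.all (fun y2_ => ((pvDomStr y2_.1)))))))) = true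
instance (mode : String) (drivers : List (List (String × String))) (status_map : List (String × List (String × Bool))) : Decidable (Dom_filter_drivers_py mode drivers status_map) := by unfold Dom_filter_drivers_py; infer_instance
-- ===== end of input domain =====

-- B replaces A's per-driver mode if-chain by staged passes: it maps the mode to the status flag it cares about, precomputes the set of flagged psns from status_map, then filters drivers by set membership (alternative decomposition; return value only — A returns a fresh list, so no observable mutation).


-- association-list lookup, first match = Python dict lookup on these inputs
def fdLookup {α : Type} (xs : List (String × α)) (k : String) : Option α :=
  (xs.find? (fun p => p.1 == k)).map (·.2)

-- ===== PORT A =====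
-- inner helper 'ok(d)': the if-chain on mode, run per driver
def fdOk (mode : String) (status_map : List (String × List (String × Bool))) (d : List (String × String)) : Bool :=
  let st := (fdLookup status_map ((fdLookup d "psn").getD "")).getD []
  if mode == "anmelden" then !((fdLookup st "registered").getD false)
  else if mode == "abmelden" then (fdLookup st "registered").getD false
  else if mode == "abo_an" then !((fdLookup st "abo").getD false) && !((fdLookup st "locked").getD false)
  else if mode == "abo_aus" then (fdLookup st "abo").getD false
  else if mode == "sperren" then !((fdLookup st "locked").getD false)
  else if mode == "entsperren" then (fdLookup st "locked").getD false
  else true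

def filter_drivers_py (mode : String) (drivers : List (List (String × String))) (status_map : List (String × List (String × Bool))) : List (List (String × String)) :=
  drivers.filter (fun d => fdOk mode status_map d)

-- ===== PORT B =====
-- the mode ↦ relevant-flag table of Source B
def fdModeFlag : List (String × String) :=
  [("anmelden", "registered"), ("abmelden", "registered"),
   ("abo_an", "abo"), ("abo_aus", "abo"),
   ("sperren", "locked"), ("entsperren", "locked")]

-- status_map.items(): the dict type is an assoc list with first-match lookup, so
-- iteration visits each key once at its first occurrence (exact for a Python dict)
def fdItems (sm : List (String × List (String × Bool))) : List (String × List (String × Bool)) :=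
  match sm with
  | [] => []
  | (k, v) :: rest => (k, v) :: fdItems (rest.filter (fun p => !(p.1 == k)))
termination_by sm.length
decreasing_by
  simp only [List.length_unattach, List.length_cons]
  exact Nat.lt_succ_of_le (le_trans (List.length_filter_le _ _) (le_of_eq List.length_attach))

-- {psn for psn, st in status_map.items() if st.get(flag)}
def fdFlagged (flag : String) (sm : List (String × List (String × Bool))) : PySem.Set String :=
  PySem.Set.ofList (((fdItems sm).filter (fun p => (fdLookup p.2 flag).getD false)).map (·.1))

def filter_drivers_py_alt (mode : String) (drivers : List (List (String × String))) (status_map : List (String × List (String × Bool))) : List (List (String × String)) :=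
  match fdLookup fdModeFlag mode with
  | none => drivers
  | some flag =>
    let flagged := fdFlagged flag status_map
    if mode == "abo_an" then
      let locked := fdFlagged "locked" status_map
      drivers.filter (fun d =>
        !(flagged.contains ((fdLookup d "psn").getD "")) &&
        !(locked.contains ((fdLookup d "psn").getD "")))
    else if mode == "abmelden" || mode == "abo_aus" || mode == "entsperren" then
      drivers.filter (fun d => flagged.contains ((fdLookup d "psn").getD ""))
    else
      drivers.filter (fun d => !(flagged.contains ((fdLookup d "psn").getD "")))

-- ===== PRECONDITION & SPEC =====
-- Pre_ excludes only inputs where some driver dict lacks the "psn" key: there d["psn"] raises KeyError in A.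
def Pre_filter_drivers_py (_mode : String) (drivers : List (List (String × String))) (_status_map : List (String × List (String × Bool))) : Prop :=
  ∀ d ∈ drivers, d.any (fun p => p.1 == "psn") = true
instance (mode : String) (drivers : List (List (String × String))) (status_map : List (String × List (String × Bool))) : Decidable (Pre_filter_drivers_py mode drivers status_map) := by unfold Pre_filter_drivers_py; infer_instance

def pvWitness_filter_drivers_py : String × (List (List (String × String))) × (List (String × List (String × Bool))) :=
  ("anmelden", [[("psn", "a")], [("psn", "b")]], [("a", [("registered", true)])])

def Spec_filter_drivers_py (mode : String) (drivers : List (List (String × String))) (status_map : List (String × List (String × Bool))) (out : List (List (String × String))) : Prop := out = filter_drivers_py_alt mode drivers status_map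
instance (mode : String) (drivers : List (List (String × String))) (status_map : List (String × List (String × Bool))) (out : List (List (String × String))) : Decidable (Spec_filter_drivers_py mode drivers status_map out) := by unfold Spec_filter_drivers_py; infer_instance

-- ===== CLAIM (what is proved, stated in full; the proofs are below) =====
def Claim_equal_filter_drivers_py : Prop := ∀ (mode : String) (drivers : List (List (String × String))) (status_map : List (String × List (String × Bool))), Dom_filter_drivers_py mode drivers status_map → Pre_filter_drivers_py mode drivers status_map → Spec_filter_drivers_py mode drivers status_map (filter_drivers_py mode drivers status_map)
-- ===== LEMMAS AND PROOFS =====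

theorem fdLookup_cons {α : Type} (x : String × α) (rest : List (String × α)) (psn : String) :
    fdLookup (x :: rest) psn = if (x.1 == psn) = true then some x.2 else fdLookup rest psn := by
  by_cases hx : (x.1 == psn) = true
  · simp [fdLookup, List.find?, hx]
  · simp [fdLookup, List.find?, hx]

theorem fdLookup_filter_ne {α : Type} (xs : List (String × α)) (k psn : String) (h : psn ≠ k) :
    fdLookup (xs.filter (fun p => !(p.1 == k))) psn = fdLookup xs psn := by
  induction xs with
  | nil => rfl
  | cons x rest ih =>
    rw [List.filter_cons]
    by_cases hk : x.1 = k
    · rw [if_neg (by simp [hk]), ih, fdLookup_cons]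
      have : (x.1 == psn) = false := by simp [hk, Ne.symm h]
      simp [this]
    · rw [if_pos (by simp [hk]), fdLookup_cons, fdLookup_cons, ih]

theorem fdItems_subset (sm : List (String × List (String × Bool))) :
    ∀ p ∈ fdItems sm, p ∈ sm := by
  match sm with
  | [] => simp [fdItems]
  | (k, v) :: rest =>
    intro p hp
    rw [fdItems] at hp
    rcases List.mem_cons.mp hp with h | h
    · simp [h]
    · have := fdItems_subset (rest.filter (fun q => !(q.1 == k))) p h
      exact List.mem_cons_of_mem _ (List.mem_of_mem_filter this)
termination_by sm.length
decreasing_by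
  have h1 := List.length_filter_le (fun q : String × List (String × Bool) => !q.1 == k) rest
  simp only [List.length_cons]
  omega

theorem mem_fdFlagged (flag : String) (sm : List (String × List (String × Bool))) (psn : String) :
    psn ∈ fdFlagged flag sm ↔ (fdLookup ((fdLookup sm psn).getD []) flag).getD false = true := by
  match sm with
  | [] => simp [fdFlagged, fdItems, fdLookup]
  | (k, v) :: rest =>
    have ih := mem_fdFlagged flag (rest.filter (fun q => !(q.1 == k))) psn
    rw [fdLookup_cons]
    simp only [fdFlagged, fdItems, PySem.Set.mem_ofList, List.mem_map, List.mem_filter,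
      List.mem_cons] at ih ⊢
    by_cases hp : psn = k
    · subst hp
      simp only [show (((psn, v)).1 == psn) = true by simp, if_pos, Option.getD_some]
      constructor
      · rintro ⟨p, ⟨h1 | h1, h2⟩, h3⟩
        · rw [h1] at h2; exact h2
        · exfalso
          have hin := fdItems_subset _ p h1
          have := List.of_mem_filter hin
          rw [h3] at this
          simp at this
      · intro hflag
        exact ⟨(psn, v), ⟨Or.inl rfl, hflag⟩, rfl⟩
    · have hk : ((k, v).1 == psn) = false := by simp [Ne.symm hp]
      simp only [hk, Bool.false_eq_true, ite_false]
      rw [← fdLookup_filter_ne rest k psn hp, ← ih]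
      constructor
      · rintro ⟨p, ⟨h1 | h1, h2⟩, h3⟩
        · exact absurd (by rw [h1] at h3; simpa using h3 : k = psn).symm hp
        · exact ⟨p, ⟨h1, h2⟩, h3⟩
      · rintro ⟨p, ⟨h1, h2⟩, h3⟩
        exact ⟨p, ⟨Or.inr h1, h2⟩, h3⟩
termination_by sm.length
decreasing_by
  have h1 := List.length_filter_le (fun q : String × List (String × Bool) => !q.1 == k) rest
  simp only [List.length_cons]
  omega

-- ===== VERDICT (by name: the statement is the Claim_ definition above) =====
theorem filter_drivers_py_spec : Claim_equal_filter_drivers_py := by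
  intro mode drivers status_map _ _
  unfold Spec_filter_drivers_py filter_drivers_py filter_drivers_py_alt
  by_cases h1 : mode = "anmelden"
  · subst h1
    simp only [fdModeFlag, fdLookup, List.find?]
    norm_num
    refine List.filter_congr (fun d _ => ?_)
    simp [fdOk, mem_fdFlagged, fdLookup]
  · by_cases h2 : mode = "abmelden"
    · subst h2
      simp only [fdModeFlag, fdLookup, List.find?]
      norm_num
      refine List.filter_congr (fun d _ => ?_)
      simp [fdOk, mem_fdFlagged, fdLookup]
    · by_cases h3 : mode = "abo_an"
      · subst h3
        simp only [fdModeFlag, fdLookup, List.find?]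
        norm_num
        refine List.filter_congr (fun d _ => ?_)
        simp [fdOk, mem_fdFlagged, fdLookup]
      · by_cases h4 : mode = "abo_aus"
        · subst h4
          simp only [fdModeFlag, fdLookup, List.find?]
          norm_num
          refine List.filter_congr (fun d _ => ?_)
          simp [fdOk, mem_fdFlagged, fdLookup]
        · by_cases h5 : mode = "sperren"
          · subst h5
            simp only [fdModeFlag, fdLookup, List.find?]
            norm_num
            refine List.filter_congr (fun d _ => ?_)
            simp [fdOk, mem_fdFlagged, fdLookup]
          · by_cases h6 : mode = "entsperren"
            · subst h6
              simp only [fdModeFlag, fdLookup, List.find?]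
              norm_num
              refine List.filter_congr (fun d _ => ?_)
              simp [fdOk, mem_fdFlagged, fdLookup]
            · have e1 : ("anmelden" == mode) = false := by simp [Ne.symm h1]
              have e2 : ("abmelden" == mode) = false := by simp [Ne.symm h2]
              have e3 : ("abo_an" == mode) = false := by simp [Ne.symm h3]
              have e4 : ("abo_aus" == mode) = false := by simp [Ne.symm h4]
              have e5 : ("sperren" == mode) = false := by simp [Ne.symm h5]
              have e6 : ("entsperren" == mode) = false := by simp [Ne.symm h6]
              simp [fdModeFlag, fdLookup, List.find?, e1, e2, e3, e4, e5, e6, fdOk, h1, h2, h3, h4, h5, h6, List.filter_true]
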